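-- pv_equiv track=rewrite | github.com/Ummi77/noocube | funcs_general.py | get_inx_and_val_of_max_val_in_1dim_list
-- ===== SOURCE A (Python) =====
-- def get_inx_and_val_of_max_val_in_1dim_list (list1Dim:list) -> int:
--     """
--     получение индекса максимального значения в одномерном списке
--     Category: Списки
--     """
--     maxval = -1
--     maxidx = None
--     for i, v in enumerate(list1Dim):
--         if v > maxval:
--             maxval = v
--             maxidx = i
--     return maxidx
-- ===== SOURCE B (Python) =====
-- def get_inx_and_val_of_max_val_in_1dim_list(list1Dim: list) -> int:
--     """Index of the first occurrence of the maximum value, or None for an empty list."""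
--     if not list1Dim:
--         return None
--     return list1Dim.index(max(list1Dim))
-- ===== Notes on version B (the rewrite author's own statement) =====
-- stated objective: idiomatic
-- what changed: Replaces the hand-rolled running-max/index accumulator loop with the standard max() + list.index() two-pass idiom.
-- intended difference: On nonempty lists whose every element is <= -1, A's -1 sentinel initialisation makes it return None, while B returns the first index of the actual maximum, which is the intended 'index of max' answer. — e.g. on get_inx_and_val_of_max_val_in_1dim_list([-5]): A returns none, B returns some 0
import Mathlib
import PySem

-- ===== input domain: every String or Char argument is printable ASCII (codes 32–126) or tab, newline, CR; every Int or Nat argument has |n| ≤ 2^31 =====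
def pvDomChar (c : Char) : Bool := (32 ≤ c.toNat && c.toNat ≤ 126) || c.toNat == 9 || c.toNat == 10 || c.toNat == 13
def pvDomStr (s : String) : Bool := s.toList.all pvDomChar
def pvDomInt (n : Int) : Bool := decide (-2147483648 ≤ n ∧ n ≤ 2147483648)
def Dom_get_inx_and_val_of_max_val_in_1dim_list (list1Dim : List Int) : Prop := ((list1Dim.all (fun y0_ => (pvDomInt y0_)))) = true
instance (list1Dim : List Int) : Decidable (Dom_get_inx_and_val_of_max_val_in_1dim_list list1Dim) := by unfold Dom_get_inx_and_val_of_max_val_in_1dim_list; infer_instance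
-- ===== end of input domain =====

-- B computes the first index of the maximum with max() + list.index() instead of A's running-max loop;
-- on nonempty all-≤-(-1) lists A's sentinel yields None while B returns the real index (stated as D_).

-- ===== PORT A =====
-- the 'for i, v in enumerate' loop over the state (maxval, maxidx)
def pvLoopA : List Int → Int → Int → Option Int → Option Int
  | [], _, _, maxidx => maxidx
  | v :: rest, i, maxval, maxidx =>
    if v > maxval then pvLoopA rest (i + 1) v (some i)
    else pvLoopA rest (i + 1) maxval maxidx

def get_inx_and_val_of_max_val_in_1dim_list (list1Dim : List Int) : Option Int :=
  pvLoopA list1Dim 0 (-1) none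

-- ===== PORT B =====
def get_inx_and_val_of_max_val_in_1dim_list_alt (list1Dim : List Int) : Option Int :=
  match list1Dim with
  | [] => none
  | _ =>
    match PySem.List.max? list1Dim (fun y => y) with
    | none => none
    | some m => (PySem.List.index? list1Dim m).map (fun k : Nat => (k : Int))

-- ===== PRECONDITION & SPEC =====
-- On nonempty lists whose every element is ≤ -1, A's -1 sentinel initialisation makes it return None,
-- while B returns the first index of the actual maximum, which is the intended 'index of max' answer.
def D_get_inx_and_val_of_max_val_in_1dim_list (list1Dim : List Int) : Prop :=
  list1Dim ≠ [] ∧ (list1Dim.all (fun v => decide (v ≤ -1))) = true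
instance (list1Dim : List Int) : Decidable (D_get_inx_and_val_of_max_val_in_1dim_list list1Dim) := by unfold D_get_inx_and_val_of_max_val_in_1dim_list; infer_instance

def Spec_get_inx_and_val_of_max_val_in_1dim_list (list1Dim : List Int) (out : Option Int) : Prop := ¬ D_get_inx_and_val_of_max_val_in_1dim_list list1Dim → out = get_inx_and_val_of_max_val_in_1dim_list_alt list1Dim
instance (list1Dim : List Int) (out : Option Int) : Decidable (Spec_get_inx_and_val_of_max_val_in_1dim_list list1Dim out) := by unfold Spec_get_inx_and_val_of_max_val_in_1dim_list; infer_instance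

def pvDiffWitness_get_inx_and_val_of_max_val_in_1dim_list : List Int := [-5]
def pvDiffWitnessOut_get_inx_and_val_of_max_val_in_1dim_list : (Option Int) × (Option Int) := (none, some 0)

-- ===== CLAIM (what is proved, stated in full; the proofs are below) =====
def Claim_unchanged_get_inx_and_val_of_max_val_in_1dim_list : Prop := ∀ (list1Dim : List Int), Dom_get_inx_and_val_of_max_val_in_1dim_list list1Dim → Spec_get_inx_and_val_of_max_val_in_1dim_list list1Dim (get_inx_and_val_of_max_val_in_1dim_list list1Dim)
def Claim_changed_get_inx_and_val_of_max_val_in_1dim_list : Prop := Dom_get_inx_and_val_of_max_val_in_1dim_list (pvDiffWitness_get_inx_and_val_of_max_val_in_1dim_list) ∧ D_get_inx_and_val_of_max_val_in_1dim_list (pvDiffWitness_get_inx_and_val_of_max_val_in_1dim_list) ∧ get_inx_and_val_of_max_val_in_1dim_list (pvDiffWitness_get_inx_and_val_of_max_val_in_1dim_list) = pvDiffWitnessOut_get_inx_and_val_of_max_val_in_1dim_list.1 ∧ get_inx_and_val_of_max_val_in_1dim_list_alt (pvDiffWitness_get_inx_and_val_of_max_val_in_1dim_list) = pvDiffWitnessOut_get_inx_and_val_of_max_val_in_1dim_list.2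 ∧ pvDiffWitnessOut_get_inx_and_val_of_max_val_in_1dim_list.1 ≠ pvDiffWitnessOut_get_inx_and_val_of_max_val_in_1dim_list.2
def Claim_exact_get_inx_and_val_of_max_val_in_1dim_list : Prop := ∀ (list1Dim : List Int), Dom_get_inx_and_val_of_max_val_in_1dim_list list1Dim → D_get_inx_and_val_of_max_val_in_1dim_list list1Dim → get_inx_and_val_of_max_val_in_1dim_list list1Dim ≠ get_inx_and_val_of_max_val_in_1dim_list_alt list1Dim

-- ===== LEMMAS AND PROOFS =====

-- filtering by a larger strict lower bound (still below the accumulator) does not change a running max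
lemma foldl_max_filter (l : List Int) : ∀ (a b c : Int), a ≤ b → b ≤ c →
    List.foldl max c (l.filter (fun x => decide (a < x))) =
    List.foldl max c (l.filter (fun x => decide (b < x))) := by
  induction l with
  | nil => intro a b c _ _; rfl
  | cons x rest ih =>
    intro a b c hab hbc
    by_cases hax : a < x
    · by_cases hbx : b < x
      · simp only [List.filter_cons, decide_eq_true hax, decide_eq_true hbx, if_true,
          List.foldl_cons]
        exact ih a b (max c x) hab (le_trans hbc (le_max_left c x))
      · have hxc : x ≤ c := le_trans (le_of_not_gt hbx) hbc
        simp only [List.filter_cons, decide_eq_true hax, decide_eq_false hbx, if_true,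
          Bool.false_eq_true, if_false, List.foldl_cons, max_eq_left hxc]
        exact ih a b c hab hbc
    · have hbx : ¬ b < x := fun h => hax (lt_of_le_of_lt hab h)
      simp only [List.filter_cons, decide_eq_false hax, decide_eq_false hbx,
        Bool.false_eq_true, if_false]
      exact ih a b c hab hbc

-- A's loop computes: the max of the elements strictly above the initial accumulator, located in the list
lemma pvLoopA_eq (l : List Int) : ∀ (i mv : Int) (mi : Option Int),
    pvLoopA l i mv mi =
      match PySem.List.max? (l.filter (fun x => decide (mv < x))) (fun y => y) with
      | none => mi
      | some m => (PySem.List.index? l m).map (fun k : Nat => i + (k : Int)) := by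
  induction l with
  | nil => intro i mv mi; rfl
  | cons v rest ih =>
    intro i mv mi
    by_cases hv : mv < v
    · have hfil : (v :: rest).filter (fun x => decide (mv < x)) =
          v :: rest.filter (fun x => decide (mv < x)) := by
        simp [hv]
      have hstep : pvLoopA (v :: rest) i mv mi = pvLoopA rest (i + 1) v (some i) := by
        simp [pvLoopA, hv]
      rw [hstep, ih (i + 1) v (some i), hfil, PySem.List.max?_id_cons]
      rcases hF : rest.filter (fun x => decide (v < x)) with _ | ⟨h, t⟩
      · -- no later element beats v: the max is v itself, first found at index i
        have hmax : List.foldl max v (rest.filter (fun x => decide (mv < x))) = v := by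
          rw [foldl_max_filter rest mv v v (le_of_lt hv) le_rfl, hF]; rfl
        have hnone : PySem.List.max? ([] : List Int) (fun y => y) = none := rfl
        rw [hnone, hmax]
        show some i = (PySem.List.index? (v :: rest) v).map (fun k : Nat => i + (k : Int))
        rw [PySem.List.index?_cons_self]
        simp
      · have hvh : v < h := by
          have : h ∈ rest.filter (fun x => decide (v < x)) := by
            rw [hF]; exact List.mem_cons_self
          simpa using (List.mem_filter.mp this).2
        have hm : List.foldl max v (rest.filter (fun x => decide (mv < x))) =
            List.foldl max h t := by
          rw [foldl_max_filter rest mv v v (le_of_lt hv) le_rfl, hF, List.foldl_cons,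
            max_eq_right (le_of_lt hvh)]
        have hvm : v < List.foldl max h t :=
          lt_of_lt_of_le hvh (PySem.List.le_foldl_max t h).1
        rw [PySem.List.max?_id_cons, hm]
        show (PySem.List.index? rest (List.foldl max h t)).map (fun k : Nat => i + 1 + (k : Int)) =
          (PySem.List.index? (v :: rest) (List.foldl max h t)).map (fun k : Nat => i + (k : Int))
        rw [PySem.List.index?_cons_of_ne rest (ne_of_lt hvm), Option.map_map]
        congr 1
        funext k
        simp only [Function.comp]
        push_cast
        ring
    · have hfil : (v :: rest).filter (fun x => decide (mv < x)) =
          rest.filter (fun x => decide (mv < x)) := by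
        simp [hv]
      have hstep : pvLoopA (v :: rest) i mv mi = pvLoopA rest (i + 1) mv mi := by
        simp [pvLoopA, hv]
      rw [hstep, ih (i + 1) mv mi, hfil]
      rcases hM : PySem.List.max? (rest.filter (fun x => decide (mv < x))) (fun y => y)
        with _ | m
      · rfl
      · have hmem := PySem.List.max?_mem hM
        have hvm : v < m := lt_of_le_of_lt (le_of_not_gt hv)
          (by simpa using (List.mem_filter.mp hmem).2)
        show (PySem.List.index? rest m).map (fun k : Nat => i + 1 + (k : Int)) =
          (PySem.List.index? (v :: rest) m).map (fun k : Nat => i + (k : Int))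
        rw [PySem.List.index?_cons_of_ne rest (ne_of_lt hvm), Option.map_map]
        congr 1
        funext k
        simp only [Function.comp]
        push_cast
        ring

-- when some element exceeds -1, the max of the (> -1)-filtered list is the max of the whole list
lemma max_filter_eq_max (l : List Int) (x : Int) (hx : x ∈ l) (hx1 : (-1 : Int) < x) :
    PySem.List.max? (l.filter (fun y => decide ((-1 : Int) < y))) (fun y => y) =
    PySem.List.max? l (fun y => y) := by
  rcases hl : l with _ | ⟨h, t⟩
  · simp [hl] at hx
  subst hl
  rcases hF : (h :: t).filter (fun y => decide ((-1 : Int) < y)) with _ | ⟨f, ft⟩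
  · exfalso
    have hxF : x ∈ (h :: t).filter (fun y => decide ((-1 : Int) < y)) :=
      List.mem_filter.mpr ⟨hx, decide_eq_true hx1⟩
    rw [hF] at hxF
    simp at hxF
  · rw [PySem.List.max?_id_cons, PySem.List.max?_id_cons]
    congr 1
    have hMmem : List.foldl max h t ∈ h :: t := by
      have := PySem.List.max?_mem (PySem.List.max?_id_cons h t)
      simpa using this
    have hMub : ∀ y ∈ h :: t, y ≤ List.foldl max h t := by
      intro y hy
      have := PySem.List.max?_isMax (PySem.List.max?_id_cons h t) y hy
      simpa using this
    have hMpos : (-1 : Int) < List.foldl max h t := lt_of_lt_of_le hx1 (hMub x hx)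
    have hMinF : List.foldl max h t ∈ f :: ft := by
      rw [← hF]; exact List.mem_filter.mpr ⟨hMmem, by simpa using hMpos⟩
    have hFub : ∀ y ∈ f :: ft, y ≤ List.foldl max f ft := by
      intro y hy
      have := PySem.List.max?_isMax (PySem.List.max?_id_cons f ft) y hy
      simpa using this
    have hFmem : List.foldl max f ft ∈ f :: ft := by
      have := PySem.List.max?_mem (PySem.List.max?_id_cons f ft)
      simpa using this
    have hFinl : List.foldl max f ft ∈ h :: t := by
      have := hFmem
      rw [← hF] at this
      exact (List.mem_filter.mp this).1
    exact le_antisymm (hMub _ hFinl) (hFub _ hMinF)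

-- ===== VERDICT (by name: the statement is the Claim_ definition above) =====
theorem get_inx_and_val_of_max_val_in_1dim_list_spec : Claim_unchanged_get_inx_and_val_of_max_val_in_1dim_list := by
  intro l _
  intro hD
  unfold get_inx_and_val_of_max_val_in_1dim_list get_inx_and_val_of_max_val_in_1dim_list_alt
  rcases hl : l with _ | ⟨h, t⟩
  · rfl
  · subst hl
    have hx : ∃ x ∈ h :: t, (-1 : Int) < x := by
      by_contra hall
      push_neg at hall
      exact hD ⟨by simp, by
        simp only [List.all_eq_true]
        intro v hv
        simpa using le_of_not_gt (fun hc => absurd hc (by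
          have := hall v hv; omega))⟩
    rcases hx with ⟨x, hxmem, hx1⟩
    rw [pvLoopA_eq (h :: t) 0 (-1) none,
      max_filter_eq_max (h :: t) x hxmem hx1, PySem.List.max?_id_cons]
    simp

theorem get_inx_and_val_of_max_val_in_1dim_list_changed : Claim_changed_get_inx_and_val_of_max_val_in_1dim_list := by
  unfold Claim_changed_get_inx_and_val_of_max_val_in_1dim_list; decide

theorem get_inx_and_val_of_max_val_in_1dim_list_tight : Claim_exact_get_inx_and_val_of_max_val_in_1dim_list := by
  intro l _ hD
  rcases hD with ⟨hne, hall⟩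
  rcases hl : l with _ | ⟨h, t⟩
  · exact absurd hl hne
  subst hl
  have hA : get_inx_and_val_of_max_val_in_1dim_list (h :: t) = none := by
    unfold get_inx_and_val_of_max_val_in_1dim_list
    rw [pvLoopA_eq (h :: t) 0 (-1) none]
    have hF : (h :: t).filter (fun x => decide ((-1 : Int) < x)) = [] := by
      rw [List.filter_eq_nil_iff]
      intro v hv
      simp only [List.all_eq_true] at hall
      have := hall v hv
      simp at this ⊢
      omega
    rw [hF]
    rfl
  have hB : get_inx_and_val_of_max_val_in_1dim_list_alt (h :: t) ≠ none := by
    unfold get_inx_and_val_of_max_val_in_1dim_list_alt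
    rw [PySem.List.max?_id_cons]
    have hmem : List.foldl max h t ∈ h :: t := by
      have := PySem.List.max?_mem (PySem.List.max?_id_cons h t)
      simpa using this
    have : (PySem.List.index? (h :: t) (List.foldl max h t)).isSome = true :=
      (PySem.List.index?_isSome_iff _ _).mpr hmem
    show Option.map (fun k : Nat => (k : Int)) (PySem.List.index? (h :: t) (List.foldl max h t)) ≠ none
    rcases hI : PySem.List.index? (h :: t) (List.foldl max h t) with _ | k
    · rw [hI] at this; simp at this
    · simp
  rw [hA]
  exact fun hc => hB hc.symm
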